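-- pv_equiv track=rewrite | github.com/amitcjmu/Stock-Analysis | backend/app/services/crewai_flows/agents/decision_agents.py | _are_common_variations
-- ===== SOURCE A (Python) =====
-- def _are_common_variations(source: str, target: str) -> bool:
--     """Check if fields are common variations of each other"""
--     variations = [
--         ('hostname', 'host_name', 'host'),
--         ('ipaddress', 'ip_address', 'ip'),
--         ('macaddress', 'mac_address', 'mac'),
--         ('environment', 'env', 'environment_name')
--     ]
--
--     source_lower = source.lower().replace('_', '').replace('-', '')
--     target_lower = target.lower().replace('_', '').replace('-', '')
--
--     for group in variations:
--         normalized_group = [v.replace('_', '').replace('-', '') for v in group]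
--         if source_lower in normalized_group and target_lower in normalized_group:
--             return True
--
--     return False
-- ===== SOURCE B (Python) =====
-- _VARIATIONS = [
--     ('hostname', 'host_name', 'host'),
--     ('ipaddress', 'ip_address', 'ip'),
--     ('macaddress', 'mac_address', 'mac'),
--     ('environment', 'env', 'environment_name')
-- ]
--
-- def _normalize(name):
--     return name.lower().replace('_', '').replace('-', '')
--
-- _INDEX = {}
-- for _i, _group in enumerate(_VARIATIONS):
--     for _v in _group:
--         _INDEX[_normalize(_v)] = _i
--
-- def _are_common_variations(source: str, target: str) -> bool:
--     s = _INDEX.get(_normalize(source))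
--     return s is not None and s == _INDEX.get(_normalize(target))
-- ===== Notes on version B (the rewrite author's own statement) =====
-- stated objective: idiomatic
-- what changed: Replaces the per-call scan over variation groups (building each normalized group list and testing two memberships) with a variant-to-group-index dict precomputed once at module load; the call itself is two dict lookups and an equality check.
import Mathlib
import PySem

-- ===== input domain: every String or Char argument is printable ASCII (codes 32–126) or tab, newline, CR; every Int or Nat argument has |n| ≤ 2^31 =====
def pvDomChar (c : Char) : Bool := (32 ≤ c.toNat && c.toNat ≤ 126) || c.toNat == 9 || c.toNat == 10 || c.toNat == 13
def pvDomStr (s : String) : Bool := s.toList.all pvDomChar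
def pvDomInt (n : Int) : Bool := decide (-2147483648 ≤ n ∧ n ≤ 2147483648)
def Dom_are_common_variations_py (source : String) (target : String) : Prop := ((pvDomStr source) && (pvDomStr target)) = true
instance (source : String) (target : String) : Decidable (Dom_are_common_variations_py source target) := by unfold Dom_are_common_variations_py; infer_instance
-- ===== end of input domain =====

-- B replaces A's per-call scan over variation groups with a variant→group-index
-- dict built once; the call is two lookups and an equality check (idiomatic).

-- ===== PORT A =====
def pvVariations : List (String × String × String) :=
  [("hostname", "host_name", "host"),
   ("ipaddress", "ip_address", "ip"),
   ("macaddress", "mac_address", "mac"),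
   ("environment", "env", "environment_name")]

-- source.lower().replace('_', '').replace('-', '')
def pvNormLower (s : String) : String :=
  PySem.Str.replace (PySem.Str.replace (PySem.Str.lower s) "_" "") "-" ""

-- v.replace('_', '').replace('-', '')  (the comprehension's body; no lower())
def pvNormVar (v : String) : String :=
  PySem.Str.replace (PySem.Str.replace v "_" "") "-" ""

-- the 'for group in variations' loop with its early return
def pvALoop (groups : List (String × String × String)) (sl tl : String) : Bool :=
  match groups with
  | [] => false
  | g :: rest =>
    let ng := [pvNormVar g.1, pvNormVar g.2.1, pvNormVar g.2.2]
    if ng.contains sl && ng.contains tl then true else pvALoop rest sl tl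

def are_common_variations_py (source : String) (target : String) : Bool :=
  pvALoop pvVariations (pvNormLower source) (pvNormLower target)

-- ===== PORT B =====
-- _INDEX: for _i, _group in enumerate(_VARIATIONS): for _v in _group: _INDEX[_normalize(_v)] = _i
def pvIndex : PySem.Dict String Int :=
  (PySem.List.enumerate pvVariations).foldl
    (fun d p =>
      ((d.insert (pvNormLower p.2.1) p.1).insert (pvNormLower p.2.2.1) p.1).insert
        (pvNormLower p.2.2.2) p.1)
    PySem.Dict.empty

def are_common_variations_py_alt (source : String) (target : String) : Bool :=
  match pvIndex.get? (pvNormLower source) with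
  | none => false
  | some i => pvIndex.get? (pvNormLower target) == some i

-- ===== PRECONDITION & SPEC =====
def Spec_are_common_variations_py (source : String) (target : String) (out : Bool) : Prop := out = are_common_variations_py_alt source target
instance (source : String) (target : String) (out : Bool) : Decidable (Spec_are_common_variations_py source target out) := by unfold Spec_are_common_variations_py; infer_instance

-- ===== CLAIM (what is proved, stated in full; the proofs are below) =====
def Claim_equal_are_common_variations_py : Prop := ∀ (source : String) (target : String), Dom_are_common_variations_py source target → Spec_are_common_variations_py source target (are_common_variations_py source target)

-- ===== LEMMAS AND PROOFS =====

-- classification of a normalized name by group index, in lookup orientation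
def pvCls (x : String) : Option Int :=
  if "hostname" == x then some 0 else if "host" == x then some 0 else
  if "ipaddress" == x then some 1 else if "ip" == x then some 1 else
  if "macaddress" == x then some 2 else if "mac" == x then some 2 else
  if "environment" == x then some 3 else if "env" == x then some 3 else
  if "environmentname" == x then some 3 else none

lemma pvIndex_eq : pvIndex = PySem.Dict.mk
    [("hostname", 0), ("host", 0), ("ipaddress", 1), ("ip", 1),
     ("macaddress", 2), ("mac", 2), ("environment", 3), ("env", 3),
     ("environmentname", 3)] := by
  have e1 : pvNormLower "hostname" = "hostname" := by decide
  have e2 : pvNormLower "host_name" = "hostname" := by decide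
  have e3 : pvNormLower "host" = "host" := by decide
  have e4 : pvNormLower "ipaddress" = "ipaddress" := by decide
  have e5 : pvNormLower "ip_address" = "ipaddress" := by decide
  have e6 : pvNormLower "ip" = "ip" := by decide
  have e7 : pvNormLower "macaddress" = "macaddress" := by decide
  have e8 : pvNormLower "mac_address" = "macaddress" := by decide
  have e9 : pvNormLower "mac" = "mac" := by decide
  have e10 : pvNormLower "environment" = "environment" := by decide
  have e11 : pvNormLower "env" = "env" := by decide
  have e12 : pvNormLower "environment_name" = "environmentname" := by decide
  simp only [pvIndex, pvVariations, PySem.List.enumerate_cons, PySem.List.enumerate_nil,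
    List.foldl_cons, List.foldl_nil, e1, e2, e3, e4, e5, e6, e7, e8, e9, e10, e11, e12]
  decide

lemma pvIndex_get (x : String) : pvIndex.get? x = pvCls x := by
  rw [pvIndex_eq]
  simp only [PySem.Dict.get?_mk_cons]
  unfold pvCls
  split_ifs <;> rfl

lemma pvCls_range (x : String) :
    pvCls x = none ∨ pvCls x = some 0 ∨ pvCls x = some 1 ∨ pvCls x = some 2 ∨ pvCls x = some 3 := by
  unfold pvCls; split_ifs <;> simp

lemma pvContains0 (x : String) :
    (["hostname", "hostname", "host"].contains x) = (pvCls x == some 0) := by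
  unfold pvCls
  simp only [List.contains_cons, List.contains_nil, Bool.or_false]
  split_ifs <;> simp_all only [beq_iff_eq] <;> (try subst_vars) <;> (try decide) <;>
    (simp only [show ∀ (i : Int), ((none : Option Int) == some i) = false from fun _ => rfl,
       Bool.or_eq_false_iff, beq_eq_false_iff_ne, ne_eq]
     refine ⟨fun h => ?_, fun h => ?_, fun h => ?_⟩ <;> subst h <;> simp_all)

lemma pvContains1 (x : String) :
    (["ipaddress", "ipaddress", "ip"].contains x) = (pvCls x == some 1) := by
  unfold pvCls
  simp only [List.contains_cons, List.contains_nil, Bool.or_false]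
  split_ifs <;> simp_all only [beq_iff_eq] <;> (try subst_vars) <;> (try decide) <;>
    (simp only [show ∀ (i : Int), ((none : Option Int) == some i) = false from fun _ => rfl,
       Bool.or_eq_false_iff, beq_eq_false_iff_ne, ne_eq]
     refine ⟨fun h => ?_, fun h => ?_, fun h => ?_⟩ <;> subst h <;> simp_all)

lemma pvContains2 (x : String) :
    (["macaddress", "macaddress", "mac"].contains x) = (pvCls x == some 2) := by
  unfold pvCls
  simp only [List.contains_cons, List.contains_nil, Bool.or_false]
  split_ifs <;> simp_all only [beq_iff_eq] <;> (try subst_vars) <;> (try decide) <;>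
    (simp only [show ∀ (i : Int), ((none : Option Int) == some i) = false from fun _ => rfl,
       Bool.or_eq_false_iff, beq_eq_false_iff_ne, ne_eq]
     refine ⟨fun h => ?_, fun h => ?_, fun h => ?_⟩ <;> subst h <;> simp_all)

lemma pvContains3 (x : String) :
    (["environment", "env", "environmentname"].contains x) = (pvCls x == some 3) := by
  unfold pvCls
  simp only [List.contains_cons, List.contains_nil, Bool.or_false]
  split_ifs <;> simp_all only [beq_iff_eq] <;> (try subst_vars) <;> (try decide) <;>
    (simp only [show ∀ (i : Int), ((none : Option Int) == some i) = false from fun _ => rfl,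
       Bool.or_eq_false_iff, beq_eq_false_iff_ne, ne_eq]
     refine ⟨fun h => ?_, fun h => ?_, fun h => ?_⟩ <;> subst h <;> simp_all)


lemma pvALoop_eq (a b : String) :
    pvALoop pvVariations a b =
      (((pvCls a == some 0) && (pvCls b == some 0)) ||
       ((pvCls a == some 1) && (pvCls b == some 1)) ||
       ((pvCls a == some 2) && (pvCls b == some 2)) ||
       ((pvCls a == some 3) && (pvCls b == some 3))) := by
  have h : pvALoop pvVariations a b =
      (if (["hostname", "hostname", "host"].contains a &&
           ["hostname", "hostname", "host"].contains b) then true else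
       if (["ipaddress", "ipaddress", "ip"].contains a &&
           ["ipaddress", "ipaddress", "ip"].contains b) then true else
       if (["macaddress", "macaddress", "mac"].contains a &&
           ["macaddress", "macaddress", "mac"].contains b) then true else
       if (["environment", "env", "environmentname"].contains a &&
           ["environment", "env", "environmentname"].contains b) then true else false) := rfl
  rw [h, pvContains0 a, pvContains0 b, pvContains1 a, pvContains1 b,
      pvContains2 a, pvContains2 b, pvContains3 a, pvContains3 b]
  rcases pvCls_range a with ha | ha | ha | ha | ha <;>
    rcases pvCls_range b with hb | hb | hb | hb | hb <;> simp [ha, hb]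

lemma pvMain (a b : String) :
    pvALoop pvVariations a b =
      (match pvCls a with
       | none => false
       | some i => pvCls b == some i) := by
  rw [pvALoop_eq]
  rcases pvCls_range a with ha | ha | ha | ha | ha <;>
    rcases pvCls_range b with hb | hb | hb | hb | hb <;> simp [ha, hb]

-- ===== VERDICT (by name: the statement is the Claim_ definition above) =====
theorem are_common_variations_py_spec : Claim_equal_are_common_variations_py := by
  intro source target _
  unfold Spec_are_common_variations_py
  unfold are_common_variations_py are_common_variations_py_alt
  rw [pvIndex_get, pvIndex_get, pvMain]
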